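-- pv_equiv track=rewrite | github.com/NoisNette/Codesignal-solutions | cyclicSequence.py | cyclicSequence
-- ===== SOURCE A (Python) =====
-- def cyclicSequence(sequence):
--     found = False
--     st = -1
--     for i in range(1, len(sequence)):
--         if sequence[i - 1] == sequence[i]:
--             return False
--         if sequence[i - 1] > sequence[i]:
--             if found:
--                 return False
--             found = True
--             st = i
--     return st != -1 and sequence[0] > sequence[len(sequence) - 1] or st == -1
-- ===== SOURCE B (Python) =====
-- def cyclicSequence(sequence):
--     # Rotate the sequence to start at its first minimum; it is cyclically
--     # strictly sorted iff that rotation is strictly increasing.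
--     if len(sequence) < 2:
--         return True
--     k = sequence.index(min(sequence))
--     r = sequence[k:] + sequence[:k]
--     return all(a < b for a, b in zip(r, r[1:]))
-- ===== Notes on version B (the rewrite author's own statement) =====
-- stated objective: alternative
-- what changed: Replaces A's single-pass descent state machine (found/st flags plus a separate wrap-around comparison) by a find-pivot-then-verify strategy: locate the first minimum, build the rotation starting there, and check that this rotation is strictly increasing.
import Mathlib
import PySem

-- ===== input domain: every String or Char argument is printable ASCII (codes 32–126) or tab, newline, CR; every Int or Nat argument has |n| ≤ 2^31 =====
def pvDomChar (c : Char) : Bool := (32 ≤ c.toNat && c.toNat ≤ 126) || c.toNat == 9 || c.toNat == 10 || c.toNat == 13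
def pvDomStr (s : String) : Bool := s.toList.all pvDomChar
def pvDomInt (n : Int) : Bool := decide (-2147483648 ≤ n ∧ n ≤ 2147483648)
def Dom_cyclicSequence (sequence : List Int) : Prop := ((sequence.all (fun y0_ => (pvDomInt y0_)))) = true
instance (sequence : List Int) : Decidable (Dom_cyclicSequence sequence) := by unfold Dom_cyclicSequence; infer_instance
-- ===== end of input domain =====

-- B replaces A's descent state machine by find-pivot-then-verify: rotate to the first minimum and check that rotation is strictly increasing (alternative decomposition, same cost).

-- ===== PORT A =====
-- the for-loop with early returns: none = 'return False', some = final (found, st)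
def cyclicSequenceLoop (prev : Int) (rest : List Int) (i : Int) (found : Bool) (st : Int) :
    Option (Bool × Int) :=
  match rest with
  | [] => some (found, st)
  | b :: tl =>
    if prev == b then none
    else if prev > b then
      (if found then none else cyclicSequenceLoop b tl (i + 1) true i)
    else cyclicSequenceLoop b tl (i + 1) found st

def cyclicSequence (sequence : List Int) : Bool :=
  match sequence with
  | [] => true  -- loop body never runs; st == -1, so the final 'or' is True
  | a :: tl =>
    match cyclicSequenceLoop a tl 1 false (-1) with
    | none => false
    | some (_, st) =>
      (st != -1 &&
        decide ((PySem.List.pyGet? sequence 0).getD 0 >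
                (PySem.List.pyGet? sequence ((sequence.length : Int) - 1)).getD 0))
      || (st == -1)

-- ===== PORT B =====
-- k = sequence.index(min(sequence)); r = sequence[k:] + sequence[:k];
-- all(a < b for a, b in zip(r, r[1:]))
def cyclicSequence_alt (sequence : List Int) : Bool :=
  if sequence.length < 2 then true
  else
    let m := (PySem.List.min? sequence (fun x => x)).getD 0
    let k := (PySem.List.index? sequence m).getD 0
    let r := PySem.List.slice sequence (some (k : Int)) none ++
             PySem.List.slice sequence none (some (k : Int))
    (r.zip (PySem.List.slice r (some 1) none)).all (fun p => decide (p.1 < p.2))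

-- ===== PRECONDITION & SPEC =====
def Spec_cyclicSequence (sequence : List Int) (out : Bool) : Prop := out = cyclicSequence_alt sequence
instance (sequence : List Int) (out : Bool) : Decidable (Spec_cyclicSequence sequence out) := by unfold Spec_cyclicSequence; infer_instance

-- ===== CLAIM (what is proved, stated in full; the proofs are below) =====
def Claim_equal_cyclicSequence : Prop := ∀ (sequence : List Int), Dom_cyclicSequence sequence → Spec_cyclicSequence sequence (cyclicSequence sequence)

-- ===== LEMMAS AND PROOFS =====

-- number of equal adjacent pairs / strict drops in a pair list
def pvEqc (P : List (Int × Int)) : Nat := P.countP (fun p => p.1 == p.2)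
def pvDc (P : List (Int × Int)) : Nat := P.countP (fun p => decide (p.1 > p.2))

-- the list of cyclic adjacent pairs of l (each element paired with its cyclic successor)
def pvCyc (l : List Int) : List (Int × Int) := l.zip (l.tail ++ l.take 1)

-- zipping a list against its rotation-by-one = adjacent pairs plus the wrap pair
theorem pvZip_cyc (tl : List Int) (x w : Int) :
    (x :: tl).zip (tl ++ [w]) = (x :: tl).zip tl ++ [(tl.getLastD x, w)] := by
  induction tl generalizing x with
  | nil => rfl
  | cons b tl ih =>
    show (x, b) :: (b :: tl).zip (tl ++ [w]) =
         (x, b) :: ((b :: tl).zip tl ++ [((b :: tl).getLastD x, w)])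
    rw [ih b, List.getLastD_cons]

-- splitting off the head pair of the counts
theorem pvEqc_cons (prev b : Int) (tl : List Int) :
    pvEqc ((prev :: b :: tl).zip (b :: tl)) =
      pvEqc ((b :: tl).zip tl) + (if prev = b then 1 else 0) := by
  simp [pvEqc, List.zip_cons_cons, List.countP_cons]

theorem pvDc_cons (prev b : Int) (tl : List Int) :
    pvDc ((prev :: b :: tl).zip (b :: tl)) =
      pvDc ((b :: tl).zip tl) + (if prev > b then 1 else 0) := by
  simp [pvDc, List.zip_cons_cons, List.countP_cons]

-- splitting off the trailing wrap pair of the counts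
theorem pvEqc_append (P : List (Int × Int)) (x y : Int) :
    pvEqc (P ++ [(x, y)]) = pvEqc P + (if x = y then 1 else 0) := by
  simp [pvEqc, List.countP_append, List.countP_cons]

theorem pvDc_append (P : List (Int × Int)) (x y : Int) :
    pvDc (P ++ [(x, y)]) = pvDc P + (if x > y then 1 else 0) := by
  simp [pvDc, List.countP_append, List.countP_cons]

-- if every adjacent pair strictly increases, head < last
theorem pvIncr (tl : List Int) (a : Int) (hne : tl ≠ [])
    (he : pvEqc ((a :: tl).zip tl) = 0) (hd : pvDc ((a :: tl).zip tl) = 0) :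
    a < tl.getLastD a := by
  induction tl generalizing a with
  | nil => exact absurd rfl hne
  | cons b tl ih =>
    rw [pvEqc_cons] at he
    rw [pvDc_cons] at hd
    have hab : a ≠ b := by intro h; simp [h] at he
    have hgt : ¬ a > b := by intro h; simp [h] at hd
    have hlt : a < b := by omega
    rw [if_neg hab] at he
    rw [if_neg hgt] at hd
    rw [List.getLastD_cons]
    rcases List.eq_nil_or_concat tl with h | _
    · subst h; simpa using hlt
    · have htl : tl ≠ [] := by rintro rfl; simp_all
      have hlast := ih b htl (by omega) (by omega)
      calc a < b := hlt
        _ < tl.getLastD b := hlast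

-- characterization of A's loop: none = early 'return False'; otherwise it runs through
-- exactly when the prefix has no equal pair and at most one descent (counting 'found')
theorem pvLoopA (rest : List Int) (prev i st : Int) (found : Bool)
    (hi : 1 ≤ i) (hst : st = -1 ↔ found = false) :
    match cyclicSequenceLoop prev rest i found st with
    | none => ¬ (pvEqc ((prev :: rest).zip rest) = 0 ∧
                 pvDc ((prev :: rest).zip rest) + (cond found 1 0) ≤ 1)
    | some (f', s') =>
        (pvEqc ((prev :: rest).zip rest) = 0 ∧
         pvDc ((prev :: rest).zip rest) + (cond found 1 0) ≤ 1) ∧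
        f' = (found || decide (pvDc ((prev :: rest).zip rest) = 1)) ∧
        (s' = -1 ↔ f' = false) := by
  induction rest generalizing prev i st found with
  | nil =>
    have h : cyclicSequenceLoop prev [] i found st = some (found, st) := rfl
    rw [h]
    refine ⟨⟨by simp [pvEqc], by cases found <;> simp [pvDc]⟩, by simp [pvDc], hst⟩
  | cons b tl ih =>
    by_cases h1 : prev = b
    · have h : cyclicSequenceLoop prev (b :: tl) i found st = none := by
        simp [cyclicSequenceLoop, h1]
      rw [h, pvEqc_cons, if_pos h1]
      rintro ⟨hce, -⟩
      omega
    · by_cases h2 : prev > b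
      · cases found with
        | true =>
          have h : cyclicSequenceLoop prev (b :: tl) i true st = none := by
            simp [cyclicSequenceLoop, h1, h2]
          rw [h, pvDc_cons, if_pos h2]
          rintro ⟨-, hcd⟩
          simp only [Bool.cond_true] at hcd
          omega
        | false =>
          have hstep : cyclicSequenceLoop prev (b :: tl) i false st =
              cyclicSequenceLoop b tl (i + 1) true i := by
            simp [cyclicSequenceLoop, h1, h2]
          rw [hstep, pvEqc_cons, if_neg h1, pvDc_cons, if_pos h2]
          have hrec := ih b (i + 1) i true (by omega) (by simp; omega)
          revert hrec
          cases hres : cyclicSequenceLoop b tl (i + 1) true i with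
          | none =>
            intro hn hc
            simp only [Bool.cond_false, Bool.cond_true] at *
            exact hn ⟨by omega, by omega⟩
          | some fs =>
            obtain ⟨f', s'⟩ := fs
            rintro ⟨⟨hce, hcd⟩, hf, hs⟩
            simp only [Bool.cond_false, Bool.cond_true] at *
            refine ⟨⟨by omega, by omega⟩, ?_, hs⟩
            rw [hf]
            have hdc1 : pvDc ((b :: tl).zip tl) = 0 := by omega
            simp [hdc1]
      · have hstep : cyclicSequenceLoop prev (b :: tl) i found st =
            cyclicSequenceLoop b tl (i + 1) found st := by
          simp [cyclicSequenceLoop, h1, h2]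
        rw [hstep, pvEqc_cons, if_neg h1, pvDc_cons, if_neg h2]
        have hrec := ih b (i + 1) st found (by omega) hst
        revert hrec
        cases hres : cyclicSequenceLoop b tl (i + 1) found st with
        | none =>
          intro hn hc
          exact hn ⟨by omega, by omega⟩
        | some fs =>
          obtain ⟨f', s'⟩ := fs
          rintro ⟨⟨hce, hcd⟩, hf, hs⟩
          exact ⟨⟨by omega, by omega⟩, by simpa using hf, hs⟩

-- the two faces of pvLoopA as rewrite-friendly lemmas
theorem pvLoopA_none (rest : List Int) (prev i st : Int) (found : Bool)
    (hi : 1 ≤ i) (hst : st = -1 ↔ found = false)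
    (h : cyclicSequenceLoop prev rest i found st = none) :
    ¬ (pvEqc ((prev :: rest).zip rest) = 0 ∧
       pvDc ((prev :: rest).zip rest) + (cond found 1 0) ≤ 1) := by
  have hl := pvLoopA rest prev i st found hi hst
  rw [h] at hl
  exact hl

theorem pvLoopA_some (rest : List Int) (prev i st : Int) (found f' : Bool) (s' : Int)
    (hi : 1 ≤ i) (hst : st = -1 ↔ found = false)
    (h : cyclicSequenceLoop prev rest i found st = some (f', s')) :
    (pvEqc ((prev :: rest).zip rest) = 0 ∧
     pvDc ((prev :: rest).zip rest) + (cond found 1 0) ≤ 1) ∧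
    f' = (found || decide (pvDc ((prev :: rest).zip rest) = 1)) ∧
    (s' = -1 ↔ f' = false) := by
  have hl := pvLoopA rest prev i st found hi hst
  rw [h] at hl
  exact hl

-- the last element of a nonempty list, as A's sequence[len(sequence)-1] computes it
theorem pvGetLast (a : Int) (rest : List Int) :
    (a :: rest)[rest.length]? = some (rest.getLastD a) := by
  induction rest generalizing a with
  | nil => rfl
  | cons b tl ih =>
    rw [List.length_cons, List.getElem?_cons_succ, ih b, List.getLastD_cons]

theorem pvLast (a : Int) (rest : List Int) :
    (PySem.List.pyGet? (a :: rest) (((a :: rest).length : Int) - 1)).getD 0 = rest.getLastD a := by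
  have h : ((a :: rest).length : Int) - 1 = ((rest.length : Nat) : Int) := by simp
  rw [h, PySem.List.pyGet?_natCast, pvGetLast]
  rfl

-- unfolding A's port on a nonempty list
theorem pvA_cons (a : Int) (rest : List Int) :
    cyclicSequence (a :: rest) =
      match cyclicSequenceLoop a rest 1 false (-1) with
      | none => false
      | some (_, st) =>
        (st != -1 &&
          decide ((PySem.List.pyGet? (a :: rest) 0).getD 0 >
                  (PySem.List.pyGet? (a :: rest) (((a :: rest).length : Int) - 1)).getD 0))
        || (st == -1) := rfl

-- ===== B-side lemmas: the pivot rotation =====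

-- the cyclic-pair list is the zip of l with its rotation by one
theorem pvCyc_eq_zip_rotate (l : List Int) : pvCyc l = l.zip (l.rotate 1) := by
  cases l with
  | nil => rfl
  | cons x xs => simp [pvCyc, List.rotate_cons_succ]

-- rotating l rotates its cyclic-pair list
theorem pvCyc_rotate (l : List Int) (k : Nat) : pvCyc (l.rotate k) = (pvCyc l).rotate k := by
  rw [pvCyc_eq_zip_rotate, pvCyc_eq_zip_rotate, List.rotate_rotate]
  have h1 : l.rotate (k + 1) = (l.rotate 1).rotate k := by
    rw [List.rotate_rotate, Nat.add_comm]
  rw [h1]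
  exact (List.zipWith_rotate_distrib Prod.mk l (l.rotate 1) k (by simp)).symm

-- hence the cyclic-pair counts are rotation invariant
theorem pvEqc_cyc_rotate (l : List Int) (k : Nat) :
    pvEqc (pvCyc (l.rotate k)) = pvEqc (pvCyc l) := by
  rw [pvCyc_rotate]; exact ((pvCyc l).rotate_perm k).countP_eq _

theorem pvDc_cyc_rotate (l : List Int) (k : Nat) :
    pvDc (pvCyc (l.rotate k)) = pvDc (pvCyc l) := by
  rw [pvCyc_rotate]; exact ((pvCyc l).rotate_perm k).countP_eq _

-- a pair list is all-strictly-increasing iff it has no equal pair and no drop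
theorem pvAll_lt (P : List (Int × Int)) :
    P.all (fun p => decide (p.1 < p.2)) = true ↔ pvEqc P = 0 ∧ pvDc P = 0 := by
  simp only [List.all_eq_true, pvEqc, pvDc, List.countP_eq_zero, decide_eq_true_eq,
    beq_iff_eq]
  constructor
  · intro h
    exact ⟨fun p hp => by have := h p hp; omega, fun p hp => by have := h p hp; omega⟩
  · rintro ⟨h1, h2⟩ p hp
    have := h1 p hp
    have := h2 p hp
    omega

theorem pvGetLastD_mem (t : List Int) (d : Int) (h : t ≠ []) : t.getLastD d ∈ t := by
  induction t generalizing d with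
  | nil => exact absurd rfl h
  | cons x xs ih =>
    rw [List.getLastD_cons]
    cases hx : xs with
    | nil => simp
    | cons y ys => exact List.mem_cons_of_mem x (hx ▸ ih x (by simp [hx]))

-- B's port, characterized by the cyclic-pair counts (the same RHS pvMain needs)
theorem pvAlt_char (a b : Int) (tl : List Int) :
    cyclicSequence_alt (a :: b :: tl) =
      (decide (pvEqc ((a :: b :: tl).zip ((b :: tl) ++ [a])) = 0) &&
       decide (pvDc ((a :: b :: tl).zip ((b :: tl) ++ [a])) = 1)) := by
  have hcyc : (a :: b :: tl).zip ((b :: tl) ++ [a]) = pvCyc (a :: b :: tl) := rfl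
  rw [hcyc]
  simp only [cyclicSequence_alt]
  rw [if_neg (by simp)]
  -- the minimum m
  cases hmin : PySem.List.min? (a :: b :: tl) (fun x => x) with
  | none => exact absurd ((PySem.List.min?_eq_none_iff _ _).mp hmin) (by simp)
  | some m =>
  simp only [Option.getD_some]
  -- its first index k
  have hmem : m ∈ a :: b :: tl := PySem.List.min?_mem hmin
  have hmle : ∀ y ∈ a :: b :: tl, m ≤ y := fun y hy => PySem.List.min?_id_le hmin y hy
  obtain ⟨k, hk⟩ := Option.isSome_iff_exists.mp
    ((PySem.List.index?_isSome_iff (a :: b :: tl) m).mpr hmem)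
  rw [hk]
  simp only [Option.getD_some]
  obtain ⟨hklt, hsk, -⟩ := PySem.List.getElem_of_index?_eq_some hk
  rw [PySem.List.slice_from_natCast, PySem.List.slice_to_natCast, PySem.List.slice_from_one]
  -- the rotation r = drop k ++ take k
  rw [show (a :: b :: tl).drop k ++ (a :: b :: tl).take k = (a :: b :: tl).rotate k from
    (List.rotate_eq_drop_append_take hklt.le).symm]
  rw [← pvEqc_cyc_rotate (a :: b :: tl) k, ← pvDc_cyc_rotate (a :: b :: tl) k]
  -- r starts with the minimum m
  obtain ⟨t, ht⟩ : ∃ t, (a :: b :: tl).rotate k = m :: t := by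
    refine ⟨(a :: b :: tl).drop (k + 1) ++ (a :: b :: tl).take k, ?_⟩
    rw [List.rotate_eq_drop_append_take hklt.le, List.drop_eq_getElem_cons hklt, hsk]
    rfl
  rw [ht]
  have htne : t ≠ [] := by
    have := List.length_rotate (a :: b :: tl) k
    rw [ht] at this
    simp only [List.length_cons] at this
    intro h
    rw [h] at this
    simp at this
  have hcyc2 : pvCyc (m :: t) = (m :: t).zip (t ++ [m]) := by
    cases t with
    | nil => exact absurd rfl htne
    | cons u us => rfl
  rw [hcyc2, pvZip_cyc t m m, pvEqc_append, pvDc_append, List.tail_cons]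
  -- last element of the rotation is ≥ the minimum
  have hLmem : t.getLastD m ∈ a :: b :: tl := by
    have h1 : t.getLastD m ∈ m :: t := List.mem_cons_of_mem m (pvGetLastD_mem t m htne)
    rw [← ht] at h1
    exact (((a :: b :: tl).rotate_perm k).mem_iff).mp h1
  have hmL : m ≤ t.getLastD m := hmle _ hLmem
  rw [Bool.eq_iff_iff]
  simp only [Bool.and_eq_true, decide_eq_true_eq, pvAll_lt]
  constructor
  · rintro ⟨hE, hD⟩
    have hlt : m < t.getLastD m := pvIncr t m htne hE hD
    rw [if_neg (by omega), if_pos (by omega)]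
    omega
  · rintro ⟨h1, h2⟩
    have hLm : t.getLastD m ≠ m := by intro h; rw [if_pos h] at h1; omega
    rw [if_neg hLm] at h1
    rw [if_pos (by omega)] at h2
    omega

-- main equivalence
theorem pvMain (sequence : List Int) : cyclicSequence sequence = cyclicSequence_alt sequence := by
  match sequence with
  | [] => rfl
  | [a] => rfl
  | a :: b :: tl =>
    rw [pvAlt_char, pvZip_cyc (b :: tl) a a, pvEqc_append, pvDc_append, pvA_cons]
    split
    next heq =>
      have hn := pvLoopA_none (b :: tl) a 1 (-1) false (by omega) (by simp) heq
      simp only [Bool.cond_false] at hn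
      rw [Bool.eq_iff_iff]
      simp only [Bool.and_eq_true, decide_eq_true_eq]
      constructor
      · intro h; exact absurd h (by simp)
      · rintro ⟨h1, h2⟩
        by_cases hLa : (b :: tl).getLastD a = a
        · rw [if_pos hLa] at h1; omega
        · rw [if_neg hLa] at h1
          by_cases hLg : (b :: tl).getLastD a > a
          · rw [if_pos hLg] at h2; omega
          · rw [if_neg hLg] at h2; omega
    next f st heq =>
      obtain ⟨⟨hce, hcd⟩, hf, hs⟩ :=
        pvLoopA_some (b :: tl) a 1 (-1) false f st (by omega) (by simp) heq
      simp only [Bool.cond_false, Bool.false_or] at hcd hf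
      have h0 : (PySem.List.pyGet? (a :: b :: tl) 0).getD 0 = a := by
        rw [show (0 : Int) = ((0 : Nat) : Int) from rfl, PySem.List.pyGet?_natCast]
        rfl
      have hlastA := pvLast a (b :: tl)
      rw [h0, hlastA]
      cases f with
      | false =>
        -- no descent in the body: strictly increasing, the wrap pair is the one descent
        have hdc : pvDc ((a :: b :: tl).zip (b :: tl)) = 0 := by
          by_contra h
          have h1 : pvDc ((a :: b :: tl).zip (b :: tl)) = 1 := by omega
          rw [h1] at hf
          simp at hf
        have hincr : a < (b :: tl).getLastD a := pvIncr (b :: tl) a (by simp) hce hdc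
        have hstval : st = -1 := hs.mpr rfl
        rw [hstval]
        rw [Bool.eq_iff_iff]
        simp only [Bool.or_eq_true, Bool.and_eq_true, decide_eq_true_eq, bne_iff_ne,
          ne_eq, beq_iff_eq]
        constructor
        · intro _
          refine ⟨by rw [if_neg (by omega)]; omega, by rw [if_pos (by omega)]; omega⟩
        · intro _
          exact Or.inr trivial
      | true =>
        -- one descent in the body: cyclically sorted iff last < first
        have hdc : pvDc ((a :: b :: tl).zip (b :: tl)) = 1 := by
          by_contra h
          have h1 : pvDc ((a :: b :: tl).zip (b :: tl)) = 0 := by omega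
          rw [h1] at hf
          simp at hf
        have hst : st ≠ -1 := fun h => absurd (hs.mp h) (by simp)
        have hbne : (st != -1) = true := by simpa using hst
        have hbeq : (st == -1) = false := by simpa using hst
        rw [hbne, hbeq, Bool.true_and, Bool.or_false]
        rw [Bool.eq_iff_iff]
        simp only [Bool.and_eq_true, decide_eq_true_eq]
        by_cases hLa : (b :: tl).getLastD a = a
        · rw [if_pos hLa]
          constructor
          · intro h; omega
          · rintro ⟨h1, -⟩; omega
        · rw [if_neg hLa]
          by_cases hLg : (b :: tl).getLastD a > a
          · rw [if_pos hLg]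
            constructor
            · intro h; omega
            · rintro ⟨-, h2⟩; omega
          · rw [if_neg hLg]
            constructor
            · intro h; exact ⟨by omega, by omega⟩
            · rintro ⟨-, -⟩; omega

-- ===== VERDICT (by name: the statement is the Claim_ definition above) =====
theorem cyclicSequence_spec : Claim_equal_cyclicSequence := by
  unfold Claim_equal_cyclicSequence
  intro sequence _
  unfold Spec_cyclicSequence
  exact pvMain sequence
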